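-- pv_equiv track=rewrite | github.com/Viknesh-Rajaramon/Leetcode-Problems | Algorithms/Easy/3637_Trionic_Array_I.py | isTrionic
-- ===== SOURCE A (Python) =====
-- from typing import List
--
-- def isTrionic(nums: List[int]) -> bool:
--     p, q = 0, 0
--
--     if nums[0] >= nums[1]:
--         return False
--
--     for i in range(len(nums) - 1):
--         if nums[i] == nums[i + 1]:
--             return False
--         elif p == 0 and i > 0 and nums[i] > nums[i + 1]:
--             p = i
--         elif p > 0 and q == 0 and i > p and nums[i] < nums[i + 1]:
--             q = i
--         elif q > 0 and nums[i] > nums[i + 1]: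
--             return False
--
--     return bool(p and q and p < q)
-- ===== SOURCE B (Python) =====
-- from typing import List
--
-- def isTrionic(nums: List[int]) -> bool:
--     if nums[0] >= nums[1]:
--         return False
--     n = len(nums)
--     i = 0
--     while i + 1 < n and nums[i] < nums[i + 1]:
--         i += 1
--     p = i
--     while i + 1 < n and nums[i] > nums[i + 1]:
--         i += 1
--     q = i
--     while i + 1 < n and nums[i] < nums[i + 1]:
--         i += 1
--     return p >= 1 and p < q and q < i and i == n - 1
-- ===== Notes on version B (the rewrite author's own statement) =====
-- stated objective: simpler
-- what changed: Replaced A's single for-loop state machine over (p, q) with five guarded branches by a direct three-phase scan: three while-loops that consume the maximal strictly increasing, decreasing, increasing runs, then one final check that the runs are non-empty and cover the whole array.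
import Mathlib
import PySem

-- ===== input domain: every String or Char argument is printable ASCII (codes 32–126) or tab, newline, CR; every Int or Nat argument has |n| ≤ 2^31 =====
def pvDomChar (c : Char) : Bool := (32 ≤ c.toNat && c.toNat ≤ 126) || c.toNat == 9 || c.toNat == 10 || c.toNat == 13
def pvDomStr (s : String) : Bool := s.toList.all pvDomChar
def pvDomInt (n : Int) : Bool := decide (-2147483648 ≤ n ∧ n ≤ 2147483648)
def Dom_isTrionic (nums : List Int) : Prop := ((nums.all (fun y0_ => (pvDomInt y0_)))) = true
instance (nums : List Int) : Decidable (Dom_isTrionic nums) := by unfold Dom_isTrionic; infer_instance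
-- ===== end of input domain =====

-- B replaces A's per-index state machine by a three-run while-loop scan (same O(n) cost, plainer logic).

-- ===== PORT A =====
-- A's for-loop over range(len-1) with state (p, q) and early returns, as recursion on i
-- (the fuel argument nums.length - 1 - i only makes the recursion structural; it never changes a value).
def isTrionicLoopAux (nums : List Int) : Nat → Int → Int → Nat → Bool
  | 0, p, q, _ => decide (p ≠ 0 ∧ q ≠ 0 ∧ p < q)
  | fuel+1, p, q, i =>
    if i < nums.length - 1 then
      if nums.getD i 0 = nums.getD (i+1) 0 then false
      else if p = 0 ∧ 0 < i ∧ nums.getD (i+1) 0 < nums.getD i 0 then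
        isTrionicLoopAux nums fuel (i : Int) q (i+1)
      else if 0 < p ∧ q = 0 ∧ p < (i : Int) ∧ nums.getD i 0 < nums.getD (i+1) 0 then
        isTrionicLoopAux nums fuel p (i : Int) (i+1)
      else if 0 < q ∧ nums.getD (i+1) 0 < nums.getD i 0 then false
      else isTrionicLoopAux nums fuel p q (i+1)
    else decide (p ≠ 0 ∧ q ≠ 0 ∧ p < q)

def isTrionicLoop (nums : List Int) (p q : Int) (i : Nat) : Bool :=
  isTrionicLoopAux nums (nums.length - 1 - i) p q i

def isTrionic (nums : List Int) : Bool :=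
  if nums.getD 1 0 ≤ nums.getD 0 0 then false
  else isTrionicLoop nums 0 0 0

-- ===== PORT B =====
-- while i+1 < n and nums[i] < nums[i+1]: i += 1   (fuel nums.length - i makes it structural)
def runUpAux (nums : List Int) : Nat → Nat → Nat
  | 0, i => i
  | fuel+1, i =>
    if i + 1 < nums.length ∧ nums.getD i 0 < nums.getD (i+1) 0 then runUpAux nums fuel (i+1) else i

def runUp (nums : List Int) (i : Nat) : Nat := runUpAux nums (nums.length - i) i

-- while i+1 < n and nums[i] > nums[i+1]: i += 1
def runDownAux (nums : List Int) : Nat → Nat → Nat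
  | 0, i => i
  | fuel+1, i =>
    if i + 1 < nums.length ∧ nums.getD (i+1) 0 < nums.getD i 0 then runDownAux nums fuel (i+1) else i

def runDown (nums : List Int) (i : Nat) : Nat := runDownAux nums (nums.length - i) i

def isTrionic_alt (nums : List Int) : Bool :=
  if nums.getD 1 0 ≤ nums.getD 0 0 then false
  else
    let p := runUp nums 0
    let q := runDown nums p
    let i := runUp nums q
    decide (1 ≤ p ∧ p < q ∧ q < i ∧ i = nums.length - 1)

-- ===== PRECONDITION & SPEC =====
-- A raises IndexError on lists of length < 2 (nums[0]/nums[1]); Pre_ excludes exactly those.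
def Pre_isTrionic (nums : List Int) : Prop := 2 ≤ nums.length
instance (nums : List Int) : Decidable (Pre_isTrionic nums) := by unfold Pre_isTrionic; infer_instance
def pvWitness_isTrionic : List Int := [1, 3, 2, 4]

def Spec_isTrionic (nums : List Int) (out : Bool) : Prop := out = isTrionic_alt nums
instance (nums : List Int) (out : Bool) : Decidable (Spec_isTrionic nums out) := by unfold Spec_isTrionic; infer_instance

-- ===== CLAIM (what is proved, stated in full; the proofs are below) =====
def Claim_equal_isTrionic : Prop := ∀ (nums : List Int), Dom_isTrionic nums → Pre_isTrionic nums → Spec_isTrionic nums (isTrionic nums)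

-- ===== LEMMAS AND PROOFS =====

theorem runUp_step (nums : List Int) (i : Nat)
    (h : i + 1 < nums.length ∧ nums.getD i 0 < nums.getD (i+1) 0) :
    runUp nums i = runUp nums (i+1) := by
  have hf : nums.length - i = (nums.length - (i+1)) + 1 := by omega
  simp only [runUp]
  rw [hf]
  simp only [runUpAux]
  rw [if_pos h]

theorem runUp_eq_self (nums : List Int) (i : Nat)
    (h : ¬ (i + 1 < nums.length ∧ nums.getD i 0 < nums.getD (i+1) 0)) :
    runUp nums i = i := by
  simp only [runUp]
  cases hf : nums.length - i with
  | zero => rfl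
  | succ k => simp only [runUpAux]; rw [if_neg h]

theorem runDown_step (nums : List Int) (i : Nat)
    (h : i + 1 < nums.length ∧ nums.getD (i+1) 0 < nums.getD i 0) :
    runDown nums i = runDown nums (i+1) := by
  have hf : nums.length - i = (nums.length - (i+1)) + 1 := by omega
  simp only [runDown]
  rw [hf]
  simp only [runDownAux]
  rw [if_pos h]

theorem runDown_eq_self (nums : List Int) (i : Nat)
    (h : ¬ (i + 1 < nums.length ∧ nums.getD (i+1) 0 < nums.getD i 0)) :
    runDown nums i = i := by
  simp only [runDown]
  cases hf : nums.length - i with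
  | zero => rfl
  | succ k => simp only [runDownAux]; rw [if_neg h]

-- one unfolding of A's loop body at an in-range index
theorem loopA_unfold (nums : List Int) (p q : Int) (i : Nat) (h : i < nums.length - 1) :
    isTrionicLoop nums p q i =
      (if nums.getD i 0 = nums.getD (i+1) 0 then false
       else if p = 0 ∧ 0 < i ∧ nums.getD (i+1) 0 < nums.getD i 0 then
         isTrionicLoop nums (i : Int) q (i+1)
       else if 0 < p ∧ q = 0 ∧ p < (i : Int) ∧ nums.getD i 0 < nums.getD (i+1) 0 then
         isTrionicLoop nums p (i : Int) (i+1)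
       else if 0 < q ∧ nums.getD (i+1) 0 < nums.getD i 0 then false
       else isTrionicLoop nums p q (i+1)) := by
  have hf : nums.length - 1 - i = (nums.length - 1 - (i+1)) + 1 := by omega
  simp only [isTrionicLoop]
  rw [hf]
  simp only [isTrionicLoopAux]
  rw [if_pos h]

-- loop termination case: return value at i ≥ len - 1
theorem loopA_end (nums : List Int) (p q : Int) (i : Nat) (h : ¬ i < nums.length - 1) :
    isTrionicLoop nums p q i = decide (p ≠ 0 ∧ q ≠ 0 ∧ p < q) := by
  simp only [isTrionicLoop]
  cases hf : nums.length - 1 - i with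
  | zero => rfl
  | succ k => simp only [isTrionicLoopAux]; rw [if_neg h]

theorem runUp_le (nums : List Int) (i : Nat) : i ≤ runUp nums i := by
  by_cases h : i + 1 < nums.length ∧ nums.getD i 0 < nums.getD (i+1) 0
  · rw [runUp_step nums i h]
    have := runUp_le nums (i+1)
    omega
  · rw [runUp_eq_self nums i h]
termination_by nums.length - i
decreasing_by omega

theorem runUp_lt (nums : List Int) (i : Nat) (hi : i < nums.length) :
    runUp nums i < nums.length := by
  by_cases h : i + 1 < nums.length ∧ nums.getD i 0 < nums.getD (i+1) 0
  · rw [runUp_step nums i h]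
    exact runUp_lt nums (i+1) h.1
  · rw [runUp_eq_self nums i h]; exact hi
termination_by nums.length - i
decreasing_by omega

theorem runDown_le (nums : List Int) (i : Nat) : i ≤ runDown nums i := by
  by_cases h : i + 1 < nums.length ∧ nums.getD (i+1) 0 < nums.getD i 0
  · rw [runDown_step nums i h]
    have := runDown_le nums (i+1)
    omega
  · rw [runDown_eq_self nums i h]
termination_by nums.length - i
decreasing_by omega

theorem runDown_lt (nums : List Int) (i : Nat) (hi : i < nums.length) :
    runDown nums i < nums.length := by
  by_cases h : i + 1 < nums.length ∧ nums.getD (i+1) 0 < nums.getD i 0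
  · rw [runDown_step nums i h]
    exact runDown_lt nums (i+1) h.1
  · rw [runDown_eq_self nums i h]; exact hi
termination_by nums.length - i
decreasing_by omega

theorem runUp_stop (nums : List Int) (i : Nat)
    (h : runUp nums i + 1 < nums.length) :
    ¬ nums.getD (runUp nums i) 0 < nums.getD (runUp nums i + 1) 0 := by
  by_cases hc : i + 1 < nums.length ∧ nums.getD i 0 < nums.getD (i+1) 0
  · rw [runUp_step nums i hc] at h ⊢
    exact runUp_stop nums (i+1) h
  · rw [runUp_eq_self nums i hc] at h ⊢
    intro hlt; exact hc ⟨h, hlt⟩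
termination_by nums.length - i
decreasing_by omega

theorem runDown_stop (nums : List Int) (i : Nat)
    (h : runDown nums i + 1 < nums.length) :
    ¬ nums.getD (runDown nums i + 1) 0 < nums.getD (runDown nums i) 0 := by
  by_cases hc : i + 1 < nums.length ∧ nums.getD (i+1) 0 < nums.getD i 0
  · rw [runDown_step nums i hc] at h ⊢
    exact runDown_stop nums (i+1) h
  · rw [runDown_eq_self nums i hc] at h ⊢
    intro hlt; exact hc ⟨h, hlt⟩
termination_by nums.length - i
decreasing_by omega

-- A's loop with state (0,0) walks through a strictly increasing run unchanged.
theorem loopA_skip_up0 (nums : List Int) (i : Nat) :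
    isTrionicLoop nums 0 0 i = isTrionicLoop nums 0 0 (runUp nums i) := by
  by_cases h : i + 1 < nums.length ∧ nums.getD i 0 < nums.getD (i+1) 0
  · rw [runUp_step nums i h, ← loopA_skip_up0 nums (i+1)]
    rw [loopA_unfold nums 0 0 i (by omega),
        if_neg (by exact ne_of_lt h.2),
        if_neg (by rintro ⟨-, -, hgt⟩; exact absurd h.2 (not_lt.mpr (le_of_lt hgt))),
        if_neg (by rintro ⟨hp, -⟩; exact lt_irrefl 0 hp),
        if_neg (by rintro ⟨hq, -⟩; exact lt_irrefl 0 hq)]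
  · rw [runUp_eq_self nums i h]
termination_by nums.length - i
decreasing_by omega

-- A's loop with state (p,0), p ≠ 0, walks through a strictly decreasing run unchanged.
theorem loopA_skip_down (nums : List Int) (p : Int) (hp : p ≠ 0) (i : Nat) :
    isTrionicLoop nums p 0 i = isTrionicLoop nums p 0 (runDown nums i) := by
  by_cases h : i + 1 < nums.length ∧ nums.getD (i+1) 0 < nums.getD i 0
  · rw [runDown_step nums i h, ← loopA_skip_down nums p hp (i+1)]
    rw [loopA_unfold nums p 0 i (by omega),
        if_neg (by exact (ne_of_lt h.2).symm),
        if_neg (by rintro ⟨hp0, -⟩; exact hp hp0),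
        if_neg (by rintro ⟨-, -, -, hlt⟩; exact absurd h.2 (not_lt.mpr (le_of_lt hlt))),
        if_neg (by rintro ⟨hq, -⟩; exact lt_irrefl 0 hq)]
  · rw [runDown_eq_self nums i h]
termination_by nums.length - i
decreasing_by omega

-- A's loop with state (p,q), both nonzero, walks through a strictly increasing run unchanged.
theorem loopA_skip_up2 (nums : List Int) (p q : Int) (hp : p ≠ 0) (hq : ¬ q = 0) (hq' : 0 < q) (i : Nat) :
    isTrionicLoop nums p q i = isTrionicLoop nums p q (runUp nums i) := by
  by_cases h : i + 1 < nums.length ∧ nums.getD i 0 < nums.getD (i+1) 0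
  · rw [runUp_step nums i h, ← loopA_skip_up2 nums p q hp hq hq' (i+1)]
    rw [loopA_unfold nums p q i (by omega),
        if_neg (by exact ne_of_lt h.2),
        if_neg (by rintro ⟨hp0, -⟩; exact hp hp0),
        if_neg (by rintro ⟨-, hq0, -⟩; exact hq hq0),
        if_neg (by rintro ⟨-, hgt⟩; exact absurd h.2 (not_lt.mpr (le_of_lt hgt)))]
  · rw [runUp_eq_self nums i h]
termination_by nums.length - i
decreasing_by omega

-- ===== VERDICT (by name: the statement is the Claim_ definition above) =====
theorem isTrionic_spec : Claim_equal_isTrionic := by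
  intro nums _hdom hpre
  unfold Spec_isTrionic isTrionic isTrionic_alt
  by_cases hg : nums.getD 1 0 ≤ nums.getD 0 0
  · rw [if_pos hg, if_pos hg]
  · rw [if_neg hg, if_neg hg]
    show isTrionicLoop nums 0 0 0 =
      decide (1 ≤ runUp nums 0 ∧ runUp nums 0 < runDown nums (runUp nums 0) ∧
        runDown nums (runUp nums 0) < runUp nums (runDown nums (runUp nums 0)) ∧
        runUp nums (runDown nums (runUp nums 0)) = nums.length - 1)
    have hn : 2 ≤ nums.length := hpre
    have h01 : nums.getD 0 0 < nums.getD 1 0 := lt_of_not_ge hg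
    have hP1 : 1 ≤ runUp nums 0 := by
      rw [runUp_step nums 0 ⟨by omega, h01⟩]; exact runUp_le nums 1
    have hPn : runUp nums 0 < nums.length := runUp_lt nums 0 (by omega)
    have hPstop := runUp_stop nums 0
    rw [loopA_skip_up0 nums 0]
    generalize hP : runUp nums 0 = P at hP1 hPn hPstop ⊢
    have hPQ : P ≤ runDown nums P := runDown_le nums P
    have hQn : runDown nums P < nums.length := runDown_lt nums P hPn
    have hQstop := runDown_stop nums P
    have hQself := runDown_eq_self nums P
    have hQstep := runDown_step nums P
    have hQlow := runDown_le nums (P+1)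
    generalize hQ : runDown nums P = Q at hPQ hQn hQstop hQself hQstep ⊢
    have hQR : Q ≤ runUp nums Q := runUp_le nums Q
    have hRn : runUp nums Q < nums.length := runUp_lt nums Q hQn
    have hRstop := runUp_stop nums Q
    have hRself := runUp_eq_self nums Q
    have hRstep := runUp_step nums Q
    have hRlow := runUp_le nums (Q+1)
    generalize hR : runUp nums Q = R at hQR hRn hRstop hRself hRstep ⊢
    by_cases hPend : P + 1 < nums.length
    case neg =>
      -- P = len - 1 : A falls out of the loop with (0,0); B: Q = P, R = P.
      have hQP : Q = P := hQself (by omega)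
      subst hQP
      have hRQ : R = Q := hRself (by omega)
      rw [loopA_end nums 0 0 Q (by omega)]
      simp only [decide_eq_decide]
      omega
    case pos =>
      have hPnot : ¬ nums.getD P 0 < nums.getD (P+1) 0 := hPstop (by omega)
      by_cases hPeq : nums.getD P 0 = nums.getD (P+1) 0
      · -- plateau after first run: A returns false in the loop; B: Q = P, R = P
        have hQP : Q = P := hQself (by rintro ⟨-, hlt⟩; rw [hPeq] at hlt; exact lt_irrefl _ hlt)
        subst hQP
        have hRQ : R = Q := hRself (by rintro ⟨-, hlt⟩; exact hPnot hlt)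
        rw [loopA_unfold nums 0 0 Q (by omega), if_pos hPeq]
        symm
        rw [decide_eq_false_iff_not]
        intro hC; omega
      · -- strict descent at P: A sets p := P
        have hPgt : nums.getD (P+1) 0 < nums.getD P 0 := by
          rcases lt_trichotomy (nums.getD (P+1) 0) (nums.getD P 0) with h | h | h
          · exact h
          · exact absurd h.symm hPeq
          · exact absurd h hPnot
        rw [loopA_unfold nums 0 0 P (by omega), if_neg hPeq,
            if_pos ⟨rfl, by omega, hPgt⟩]
        have hQstepA : Q = runDown nums (P+1) := hQstep ⟨by omega, hPgt⟩
        have hPltQ : P < Q := by omega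
        have hpne : ((P : Int)) ≠ 0 := by omega
        rw [loopA_skip_down nums (P : Int) hpne (P+1), ← hQstepA]
        by_cases hQend : Q + 1 < nums.length
        case neg =>
          -- Q = len - 1: A falls out with q = 0; B: R = Q
          have hRQ : R = Q := hRself (by omega)
          rw [loopA_end nums (P : Int) 0 Q (by omega)]
          simp only [decide_eq_decide]
          omega
        case pos =>
          have hQnot : ¬ nums.getD (Q+1) 0 < nums.getD Q 0 := hQstop (by omega)
          by_cases hQeq : nums.getD Q 0 = nums.getD (Q+1) 0
          · -- plateau after the descent: A returns false; B: R = Q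
            have hRQ : R = Q := hRself (by rintro ⟨-, hlt⟩; rw [hQeq] at hlt; exact lt_irrefl _ hlt)
            rw [loopA_unfold nums (P : Int) 0 Q (by omega), if_pos hQeq]
            symm
            rw [decide_eq_false_iff_not]
            intro hC; omega
          · -- strict ascent at Q: A sets q := Q
            have hQlt : nums.getD Q 0 < nums.getD (Q+1) 0 := by
              rcases lt_trichotomy (nums.getD Q 0) (nums.getD (Q+1) 0) with h | h | h
              · exact h
              · exact absurd h hQeq
              · exact absurd h hQnot
            rw [loopA_unfold nums (P : Int) 0 Q (by omega), if_neg hQeq,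
                if_neg (by rintro ⟨hp0, -⟩; exact hpne hp0),
                if_pos ⟨by omega, rfl, by omega, hQlt⟩]
            have hRstepA : R = runUp nums (Q+1) := hRstep ⟨by omega, hQlt⟩
            have hQltR : Q < R := by omega
            have hqne : ((Q : Int)) ≠ 0 := by omega
            rw [loopA_skip_up2 nums (P : Int) (Q : Int) hpne hqne (by omega) (Q+1), ← hRstepA]
            by_cases hRend : R + 1 < nums.length
            case neg =>
              -- R = len - 1: both sides are true
              rw [loopA_end nums (P : Int) (Q : Int) R (by omega)]
              simp only [decide_eq_decide]
              omega
            case pos =>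
              have hRnot : ¬ nums.getD R 0 < nums.getD (R+1) 0 := hRstop (by omega)
              -- the loop hits index R with q > 0 and a non-ascent: returns false; B: R ≠ len-1
              have hloop : isTrionicLoop nums (P : Int) (Q : Int) R = false := by
                rw [loopA_unfold nums (P : Int) (Q : Int) R (by omega)]
                by_cases hReq : nums.getD R 0 = nums.getD (R+1) 0
                · rw [if_pos hReq]
                · have hRgt : nums.getD (R+1) 0 < nums.getD R 0 := by
                    rcases lt_trichotomy (nums.getD (R+1) 0) (nums.getD R 0) with h | h | h
                    · exact h
                    · exact absurd h.symm hReq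
                    · exact absurd h hRnot
                  rw [if_neg hReq,
                      if_neg (by rintro ⟨hp0, -⟩; exact hpne hp0),
                      if_neg (by rintro ⟨-, hq0, -⟩; exact hqne hq0),
                      if_pos ⟨by omega, hRgt⟩]
              rw [hloop]
              symm
              rw [decide_eq_false_iff_not]
              intro hC; omega
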